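-- pv_equiv track=rewrite | github.com/gagan405/PubSubOnSDN | scripts/pubsub/unadvt.py | removeUnnecessary
-- ===== SOURCE A (Python) =====
-- def removeUnnecessary(subs):
--     newsubs = []
--     covered = False
--     for s in subs:
--         covered = False
--         for t in subs:
--             if(len(t) >= len(s)):
--                 continue
--             else:
--                 if(s.find(t) == 0):
--                     covered = True
--                     break
--         if(covered is not True):
--             newsubs += [s]
--     return(newsubs)
-- ===== SOURCE B (Python) =====
-- def removeUnnecessary(subs):
--     present = set(subs)
--     return [s for s in subs
--             if not any(s[:k] in present for k in range(len(s)))]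
-- ===== Notes on version B (the rewrite author's own statement) =====
-- stated objective: faster
-- what changed: Instead of scanning the whole list for each string and calling s.find(t) on every pair, B builds a set of all strings once and for each string tests its proper prefixes s[:k] for membership, removing the inner scan over the list.
import Mathlib
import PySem

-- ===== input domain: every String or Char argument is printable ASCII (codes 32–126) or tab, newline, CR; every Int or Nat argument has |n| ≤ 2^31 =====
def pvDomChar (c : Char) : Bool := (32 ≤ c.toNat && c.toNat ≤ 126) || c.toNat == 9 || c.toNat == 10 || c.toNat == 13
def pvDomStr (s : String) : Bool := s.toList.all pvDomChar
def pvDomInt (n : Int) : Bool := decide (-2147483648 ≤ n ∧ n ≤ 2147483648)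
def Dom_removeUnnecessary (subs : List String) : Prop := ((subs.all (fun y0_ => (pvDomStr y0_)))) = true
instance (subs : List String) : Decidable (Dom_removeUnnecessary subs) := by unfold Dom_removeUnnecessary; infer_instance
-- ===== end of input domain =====

-- B replaces A's inner scan over the whole list (with s.find on every pair) by one set of all
-- strings built up front and a membership test of each proper prefix s[:k]; objective: faster
-- (constant-factor: the per-string inner pass over the list disappears).

-- ===== PORT A =====
-- inner 'for t in subs' loop with its break, returning the final value of 'covered'
def pvCoveredLoop (s : String) : List String → Bool
  | [] => false
  | t :: ts =>
    if PySem.Str.len t ≥ PySem.Str.len s then pvCoveredLoop s ts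
    else if PySem.Str.find s t == 0 then true
    else pvCoveredLoop s ts

def removeUnnecessary (subs : List String) : List String :=
  subs.foldl (fun newsubs s =>
    if !(pvCoveredLoop s subs) then newsubs ++ [s] else newsubs) []

-- ===== PORT B =====
def removeUnnecessary_alt (subs : List String) : List String :=
  let present : PySem.Set String := PySem.Set.ofList subs
  subs.filter (fun s =>
    ! ((PySem.List.pyRange 0 (PySem.Str.len s) 1).any
        (fun k => PySem.Set.contains present (PySem.Str.slice s none (some k)))))

-- ===== PRECONDITION & SPEC =====
def Spec_removeUnnecessary (subs : List String) (out : List String) : Prop := out = removeUnnecessary_alt subs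
instance (subs : List String) (out : List String) : Decidable (Spec_removeUnnecessary subs out) := by unfold Spec_removeUnnecessary; infer_instance

-- ===== CLAIM (what is proved, stated in full; the proofs are below) =====
def Claim_equal_removeUnnecessary : Prop := ∀ (subs : List String), Dom_removeUnnecessary subs → Spec_removeUnnecessary subs (removeUnnecessary subs)

-- ===== LEMMAS AND PROOFS =====

-- s.find(t) == 0 means exactly: t is a prefix of s
lemma pv_find_zero_iff (s t : String) :
    (PySem.Str.find s t = 0) ↔ t.toList <+: s.toList := by
  simp only [PySem.Str.find_eq]
  constructor
  · intro h
    have h0 : (0:Int) ≤ PySem.Chars.find s.toList t.toList := by omega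
    have := (PySem.Chars.find_spec h0).1
    simpa [h] using this
  · intro hp
    have hne : PySem.Chars.find s.toList t.toList ≠ -1 :=
      (PySem.Chars.find_ne_neg_one_iff _ _).mpr hp.isInfix
    have h0 : (0:Int) ≤ PySem.Chars.find s.toList t.toList := by
      have := PySem.Chars.neg_one_le_find (s := s.toList) (sub := t.toList); omega
    have hmin := (PySem.Chars.find_spec h0).2
    by_contra hne0
    have hpos : 0 < (PySem.Chars.find s.toList t.toList).toNat := by omega
    exact hmin 0 hpos (by simpa using hp)

-- the inner loop computes: some strictly shorter t ∈ subs is a prefix of s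
lemma pv_coveredLoop_iff (s : String) (l : List String) :
    pvCoveredLoop s l = true ↔ ∃ t ∈ l, t.toList.length < s.toList.length ∧ t.toList <+: s.toList := by
  induction l with
  | nil => simp [pvCoveredLoop]
  | cons t ts ih =>
    simp only [pvCoveredLoop]
    by_cases hlen : PySem.Str.len t ≥ PySem.Str.len s
    · simp only [if_pos hlen, ih]
      constructor
      · rintro ⟨u, hu, h1, h2⟩; exact ⟨u, List.mem_cons_of_mem _ hu, h1, h2⟩
      · rintro ⟨u, hu, h1, h2⟩
        rcases List.mem_cons.mp hu with rfl | hu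
        · exfalso; simp only [PySem.Str.len_eq] at hlen; omega
        · exact ⟨u, hu, h1, h2⟩
    · simp only [if_neg hlen]
      have hlt : t.toList.length < s.toList.length := by
        simp only [PySem.Str.len_eq] at hlen; omega
      by_cases hf : PySem.Str.find s t = 0
      · simp only [hf]
        simp only [show ((0:Int) == 0) = true from rfl, if_true, true_iff]
        exact ⟨t, List.mem_cons_self, hlt, (pv_find_zero_iff s t).mp hf⟩
      · have : (PySem.Str.find s t == 0) = false := by simpa using hf
        simp only [this, Bool.false_eq_true, if_false, ih]
        constructor
        · rintro ⟨u, hu, h1, h2⟩; exact ⟨u, List.mem_cons_of_mem _ hu, h1, h2⟩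
        · rintro ⟨u, hu, h1, h2⟩
          rcases List.mem_cons.mp hu with rfl | hu
          · exact absurd ((pv_find_zero_iff s u).mpr h2) hf
          · exact ⟨u, hu, h1, h2⟩

-- B's per-string test computes the same condition
lemma pv_any_iff (s : String) (subs : List String) :
    ((PySem.List.pyRange 0 (PySem.Str.len s) 1).any
      (fun k => PySem.Set.contains (PySem.Set.ofList subs) (PySem.Str.slice s none (some k))) = true)
    ↔ ∃ t ∈ subs, t.toList.length < s.toList.length ∧ t.toList <+: s.toList := by
  rw [List.any_eq_true]
  constructor
  · rintro ⟨k, hk, hc⟩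
    have hk' := PySem.List.mem_pyRange_one.mp hk
    have hmem : PySem.Str.slice s none (some k) ∈ subs := by
      have := (PySem.Set.contains_iff _ _).mp hc
      exact (PySem.Set.mem_ofList _ _).mp this
    refine ⟨PySem.Str.slice s none (some k), hmem, ?_, ?_⟩
    · have : (PySem.Str.slice s none (some k)).toList = s.toList.take k.toNat := by
        simp [PySem.Str.toList_slice, PySem.List.slice_to _ hk'.1]
      rw [this]
      have hlen : k < PySem.Str.len s := hk'.2
      simp only [PySem.Str.len_eq] at hlen
      rw [List.length_take]
      omega
    · have : (PySem.Str.slice s none (some k)).toList = s.toList.take k.toNat := by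
        simp [PySem.Str.toList_slice, PySem.List.slice_to _ hk'.1]
      rw [this]; exact List.take_prefix _ _
  · rintro ⟨t, ht, hlt, hp⟩
    refine ⟨(t.toList.length : Int), ?_, ?_⟩
    · refine PySem.List.mem_pyRange_one.mpr ⟨by positivity, ?_⟩
      simp only [PySem.Str.len_eq]; exact_mod_cast hlt
    · have hslice : PySem.Str.slice s none (some (t.toList.length : Int)) = t := by
        apply String.toList_inj.mp
        rw [PySem.Str.toList_slice]
        simp only [PySem.Chars.slice_eq_listSlice,
          PySem.List.slice_to _ (by positivity : (0:Int) ≤ (t.toList.length : Int))]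
        simp only [Int.toNat_natCast]
        exact (List.prefix_iff_eq_take.mp hp).symm
      rw [hslice]
      exact (PySem.Set.contains_iff _ _).mpr ((PySem.Set.mem_ofList _ _).mpr ht)

-- ===== VERDICT (by name: the statement is the Claim_ definition above) =====
theorem removeUnnecessary_spec : Claim_equal_removeUnnecessary := by
  intro subs _
  unfold Spec_removeUnnecessary removeUnnecessary removeUnnecessary_alt
  rw [PySem.List.foldl_append_if_eq_filter (fun s => !(pvCoveredLoop s subs)) subs []]
  simp only [List.nil_append]
  apply List.filter_congr
  intro s _
  have h := (pv_coveredLoop_iff s subs).trans (pv_any_iff s subs).symm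
  rw [Bool.eq_iff_iff.mpr h]
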